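-- pv_equiv track=rewrite | github.com/pranavjawale01/LeetCode-GFG | LeetCode/0564-find-the-closest-palindrome/0564-find-the-closest-palindrome.py | solve
-- ===== SOURCE A (Python) =====
-- def solve(firstHalf, isEven):
--     resultNum = firstHalf
--     if not isEven:
--         firstHalf //= 10
--     while firstHalf > 0:
--         digit = firstHalf % 10
--         resultNum = resultNum * 10 + digit
--         firstHalf //= 10
--     return resultNum
-- ===== SOURCE B (Python) =====
-- def solve(firstHalf, isEven):
--     # Build the palindrome from the decimal string: mirror the (possibly
--     # trimmed) first half by slice reversal and accumulate the mirrored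
--     # digit characters once -- no arithmetic digit-extraction loop.
--     s = str(firstHalf)
--     tail = s if isEven else s[:-1]
--     res = firstHalf
--     for ch in tail[::-1]:
--         res = res * 10 + (ord(ch) - 48)
--     return res
-- ===== Notes on version B (the rewrite author's own statement) =====
-- stated objective: alternative
-- what changed: B builds the palindrome from the decimal string -- slicing off the middle digit, reversing by slice, and folding the mirrored characters once -- instead of A's arithmetic mod-10/floordiv digit-extraction loop.
-- outside the precondition, e.g. on solve(-5, True): A returns -5, B returns -453; on solve(-5, False): A returns -5, B returns -53
import Mathlib
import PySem

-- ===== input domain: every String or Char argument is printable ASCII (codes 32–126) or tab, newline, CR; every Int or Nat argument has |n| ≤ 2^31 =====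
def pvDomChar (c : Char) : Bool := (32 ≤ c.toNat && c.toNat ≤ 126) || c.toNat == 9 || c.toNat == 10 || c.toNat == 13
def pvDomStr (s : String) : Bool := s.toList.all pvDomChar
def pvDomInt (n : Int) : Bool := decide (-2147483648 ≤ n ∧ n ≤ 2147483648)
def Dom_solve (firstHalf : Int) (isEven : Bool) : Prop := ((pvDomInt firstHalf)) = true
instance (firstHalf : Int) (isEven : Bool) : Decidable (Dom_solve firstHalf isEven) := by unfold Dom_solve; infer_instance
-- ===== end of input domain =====

-- B builds the palindrome from the decimal string (slice, reverse, one accumulation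
-- pass over the mirrored characters) instead of A's arithmetic mod/div digit loop.

-- ===== PORT A =====
-- while firstHalf > 0: digit = firstHalf % 10; resultNum = resultNum*10 + digit; firstHalf //= 10
def solveLoop (firstHalf resultNum : Int) : Int :=
  if h : 0 < firstHalf then
    solveLoop (PySem.Int.floordiv firstHalf 10) (resultNum * 10 + PySem.Int.mod firstHalf 10)
  else resultNum
termination_by firstHalf.toNat
decreasing_by
  rw [PySem.Int.floordiv, Int.fdiv_eq_ediv_of_nonneg _ (by norm_num : (0:Int) ≤ 10)]
  omega

def solve (firstHalf : Int) (isEven : Bool) : Int :=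
  let resultNum := firstHalf
  let firstHalf := if !isEven then PySem.Int.floordiv firstHalf 10 else firstHalf
  solveLoop firstHalf resultNum

-- ===== PORT B =====
-- for ch in tail[::-1]: res = res * 10 + (ord(ch) - 48)
def bStep (res : Int) (ch : Char) : Int := res * 10 + ((ch.toNat : Int) - 48)

def solve_alt (firstHalf : Int) (isEven : Bool) : Int :=
  let s := PySem.Int.toStr firstHalf                              -- s = str(firstHalf)
  let tail := if isEven then s else PySem.Str.slice s none (some (-1))  -- s[:-1]
  let rev := (PySem.Str.slice? tail none none (-1)).getD ""       -- tail[::-1] (step -1 never raises)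
  rev.toList.foldl bStep firstHalf

-- ===== PRECONDITION & SPEC =====
-- Pre_ excludes negative firstHalf: the first half of a decimal number is never negative,
-- and there neither program computes a mirror — A returns firstHalf unchanged because its
-- digit loop never runs, while B folds the '-' sign character in as if it were a digit;
-- both values are accidents of the implementations on an input no caller would specify.
def Pre_solve (firstHalf : Int) (isEven : Bool) : Prop := 0 ≤ firstHalf
instance (firstHalf : Int) (isEven : Bool) : Decidable (Pre_solve firstHalf isEven) := by unfold Pre_solve; infer_instance
def pvWitness_solve : Int × Bool := (123, true)

def Spec_solve (firstHalf : Int) (isEven : Bool) (out : Int) : Prop := out = solve_alt firstHalf isEven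
instance (firstHalf : Int) (isEven : Bool) (out : Int) : Decidable (Spec_solve firstHalf isEven out) := by unfold Spec_solve; infer_instance

-- ===== CLAIM (what is proved, stated in full; the proofs are below) =====
def Claim_equal_solve : Prop := ∀ (firstHalf : Int) (isEven : Bool), Dom_solve firstHalf isEven → Pre_solve firstHalf isEven → Spec_solve firstHalf isEven (solve firstHalf isEven)

-- ===== LEMMAS AND PROOFS =====

-- The character Nat.toDigits produces for one decimal digit stands for that digit.
lemma digitChar_val (d : Nat) (h : d < 10) : ((Nat.digitChar d).toNat : Int) - 48 = d := by
  interval_cases d <;> decide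

-- toDigitsCore threads its accumulator by list append.
lemma toDigitsCore_acc (b : Nat) : ∀ (f n : Nat) (ds : List Char),
    Nat.toDigitsCore b f n ds = Nat.toDigitsCore b f n [] ++ ds := by
  intro f
  induction f with
  | zero => intro n ds; rfl
  | succ f ih =>
    intro n ds
    simp only [Nat.toDigitsCore]
    by_cases h : n / b = 0
    · simp [h]
    · simp only [h]
      rw [ih (n / b) (Nat.digitChar (n % b) :: ds), ih (n / b) [Nat.digitChar (n % b)]]
      simp

-- Enough fuel makes the fuel parameter irrelevant.
lemma toDigitsCore_fuel : ∀ (n f₁ f₂ : Nat), 0 < f₁ → 0 < f₂ → n < 10 ^ f₁ → n < 10 ^ f₂ →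
    Nat.toDigitsCore 10 f₁ n [] = Nat.toDigitsCore 10 f₂ n [] := by
  intro n
  induction n using Nat.strong_induction_on with
  | _ n ih =>
    intro f₁ f₂ h₁ h₂ hn₁ hn₂
    obtain ⟨a, rfl⟩ : ∃ a, f₁ = a + 1 := ⟨f₁ - 1, by omega⟩
    obtain ⟨b, rfl⟩ : ∃ b, f₂ = b + 1 := ⟨f₂ - 1, by omega⟩
    simp only [Nat.toDigitsCore]
    by_cases h : n / 10 = 0
    · simp [h]
    · simp only [h]
      have hn : 10 ≤ n := by
        by_contra hc
        exact h (Nat.div_eq_of_lt (by omega))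
      have ha : 0 < a := by
        rcases Nat.eq_zero_or_pos a with rfl | hp
        · simp at hn₁; omega
        · exact hp
      have hb : 0 < b := by
        rcases Nat.eq_zero_or_pos b with rfl | hp
        · simp at hn₂; omega
        · exact hp
      have hda : n / 10 < 10 ^ a := by
        rw [Nat.div_lt_iff_lt_mul (by norm_num)]
        calc n < 10 ^ (a + 1) := hn₁
          _ = 10 ^ a * 10 := by ring
      have hdb : n / 10 < 10 ^ b := by
        rw [Nat.div_lt_iff_lt_mul (by norm_num)]
        calc n < 10 ^ (b + 1) := hn₂
          _ = 10 ^ b * 10 := by ring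
      rw [toDigitsCore_acc 10 a (n / 10) _, toDigitsCore_acc 10 b (n / 10) _,
        ih (n / 10) (Nat.div_lt_self (by omega) (by norm_num)) a b ha hb hda hdb]

lemma toDigits_small (m : Nat) (h : m < 10) : Nat.toDigits 10 m = [Nat.digitChar m] := by
  simp [Nat.toDigits, Nat.toDigitsCore, Nat.div_eq_of_lt h, Nat.mod_eq_of_lt h]

lemma toDigits_step (m : Nat) (h : 10 ≤ m) :
    Nat.toDigits 10 m = Nat.toDigits 10 (m / 10) ++ [Nat.digitChar (m % 10)] := by
  have hd : m / 10 ≠ 0 := by omega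
  have h1 : Nat.toDigits 10 m = Nat.toDigitsCore 10 m (m / 10) [Nat.digitChar (m % 10)] := by
    obtain ⟨k, rfl⟩ : ∃ k, m = k + 1 := ⟨m - 1, by omega⟩
    simp only [Nat.toDigits, Nat.toDigitsCore, hd]
    simp
  rw [h1, toDigitsCore_acc 10 m (m / 10) _]
  congr 1
  have hm : 0 < m := by omega
  have hsm : m / 10 < 10 ^ m := lt_of_le_of_lt (Nat.div_le_self m 10) (Nat.lt_pow_self (by norm_num))
  have hsd : m / 10 < 10 ^ (m / 10 + 1) :=
    lt_of_lt_of_le (Nat.lt_pow_self (by norm_num)) (Nat.pow_le_pow_right (by norm_num) (by omega))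
  exact toDigitsCore_fuel (m / 10) m (m / 10 + 1) hm (by omega) hsm hsd

-- fdiv / fmod of natural-number casts reduce to Nat division (definitional).
lemma floordiv_natCast (m : Nat) : PySem.Int.floordiv (m : Int) 10 = ((m / 10 : Nat) : Int) := by
  rw [PySem.Int.floordiv, Int.fdiv_eq_ediv_of_nonneg _ (by norm_num)]
  omega
lemma mod_natCast (m : Nat) : PySem.Int.mod (m : Int) 10 = ((m % 10 : Nat) : Int) := by
  rw [PySem.Int.mod, Int.fmod_eq_emod_of_nonneg _ (by norm_num)]
  omega

-- toChars of a nonnegative int is Nat.toDigits.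
lemma toChars_natCast (m : Nat) : PySem.Int.toChars (m : Int) = Nat.toDigits 10 m := by
  simp [PySem.Int.toChars]

-- A's loop equals B's fold over the reversed digit string, for positive m.
lemma loop_eq_fold (m : Nat) : ∀ (r : Int), 0 < m →
    (Nat.toDigits 10 m).reverse.foldl bStep r = solveLoop (m : Int) r := by
  induction m using Nat.strong_induction_on with
  | _ m ih =>
    intro r hm
    rw [solveLoop]
    rw [dif_pos (show (0:Int) < (m:Int) by exact_mod_cast hm), floordiv_natCast, mod_natCast]
    by_cases h10 : m < 10
    · rw [toDigits_small m h10]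
      simp only [List.reverse_singleton, List.foldl_cons, List.foldl_nil, bStep]
      rw [digitChar_val m h10]
      rw [Nat.div_eq_of_lt h10, Nat.mod_eq_of_lt h10]
      rw [solveLoop]
      norm_num
    · rw [toDigits_step m (by omega)]
      simp only [List.reverse_append, List.reverse_singleton, List.singleton_append,
        List.foldl_cons, bStep]
      rw [digitChar_val (m % 10) (Nat.mod_lt m (by norm_num))]
      exact ih (m / 10) (Nat.div_lt_self (by omega) (by norm_num)) _ (by omega)

-- character list of str(firstHalf) for nonnegative firstHalf
lemma toStr_toList (m : Nat) : (PySem.Int.toStr (m : Int)).toList = Nat.toDigits 10 m := by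
  rw [PySem.Int.toList_toStr, toChars_natCast]

-- ===== VERDICT (by name: the statement is the Claim_ definition above) =====
theorem solve_spec : Claim_equal_solve := by
  intro firstHalf isEven hdom hpre
  simp only [Spec_solve]
  lift firstHalf to Nat using hpre with m
  cases isEven with
  | true =>
    have hrev : ((PySem.Str.slice? (PySem.Int.toStr (m : Int)) none none (-1)).getD "").toList
        = (Nat.toDigits 10 m).reverse := by
      rw [PySem.Str.slice?_none_none_neg_one, Option.getD_some, String.toList_ofList, toStr_toList]
    show solveLoop (m : Int) (m : Int)
        = ((PySem.Str.slice? (PySem.Int.toStr (m : Int)) none none (-1)).getD "").toList.foldl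
            bStep (m : Int)
    rw [hrev]
    by_cases hm : m = 0
    · subst hm
      rw [solveLoop]
      norm_num [Nat.toDigits, Nat.toDigitsCore, bStep]
      decide
    · rw [loop_eq_fold m _ (by omega)]
  | false =>
    show solveLoop (PySem.Int.floordiv (m : Int) 10) (m : Int) = _
    rw [floordiv_natCast]
    have hrev : ((PySem.Str.slice? (PySem.Str.slice (PySem.Int.toStr (m : Int)) none (some (-1)))
          none none (-1)).getD "").toList = (Nat.toDigits 10 m).dropLast.reverse := by
      rw [PySem.Str.slice?_none_none_neg_one, Option.getD_some, String.toList_ofList,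
        PySem.Str.slice_to_neg_one, toStr_toList]
    show _ = ((PySem.Str.slice? (PySem.Str.slice (PySem.Int.toStr (m : Int)) none (some (-1)))
          none none (-1)).getD "").toList.foldl bStep (m : Int)
    rw [hrev]
    by_cases h10 : m < 10
    · rw [toDigits_small m h10]
      rw [Nat.div_eq_of_lt h10]
      simp only [List.dropLast_singleton, List.reverse_nil, List.foldl_nil]
      rw [solveLoop]
      norm_num
    · rw [toDigits_step m (by omega), List.dropLast_concat]
      rw [loop_eq_fold (m / 10) _ (by omega)]
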